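-- pv_equiv track=rewrite | github.com/pbulsink/chemcalc | script/chemcalc_utilities.py | sort_formula
-- ===== SOURCE A (Python) =====
-- def sort_formula(formula):
--     """
--     Take a 'parsed formula' style formula and return a compact elemental
--     formula. IE CH3CH2CH2CH3 --> [["C":4],["H":10]] not H then C
--     """
--     fdict = dict((x[0], x[1]) for x in formula)
--     sorted_formula = list()
--     if "C" in fdict:
--         sorted_formula.append(["C", fdict["C"]])
--         del fdict["C"]
--     if "H" in fdict:
--         sorted_formula.append(["H", fdict["H"]])
--         del fdict["H"]
--     if fdict:
--         flist = list()
--         for key in fdict: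
--             flist.append([key, fdict[key]])
--         flist.sort()
--         for e in flist:
--             sorted_formula.append([e[0], e[1]])
--     return sorted_formula
-- ===== SOURCE B (Python) =====
-- def sort_formula(formula):
--     """Hill-notation sort: C first, then H, then the rest alphabetically."""
--     fdict = {}
--     for sym, n in formula:
--         fdict[sym] = n
--
--     def hill_key(kv):
--         if kv[0] == "C":
--             return (0, "")
--         if kv[0] == "H":
--             return (1, "")
--         return (2, kv[0])
--
--     return [[k, v] for k, v in sorted(fdict.items(), key=hill_key)]
-- ===== Notes on version B (the rewrite author's own statement) =====
-- stated objective: idiomatic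
-- what changed: A stages the result by hand (extract C, extract H, sort the remainder, concatenate); B builds the same dict and produces the result with one sorted() call under a Hill-notation key (0,'') / (1,'') / (2,key).
import Mathlib
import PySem

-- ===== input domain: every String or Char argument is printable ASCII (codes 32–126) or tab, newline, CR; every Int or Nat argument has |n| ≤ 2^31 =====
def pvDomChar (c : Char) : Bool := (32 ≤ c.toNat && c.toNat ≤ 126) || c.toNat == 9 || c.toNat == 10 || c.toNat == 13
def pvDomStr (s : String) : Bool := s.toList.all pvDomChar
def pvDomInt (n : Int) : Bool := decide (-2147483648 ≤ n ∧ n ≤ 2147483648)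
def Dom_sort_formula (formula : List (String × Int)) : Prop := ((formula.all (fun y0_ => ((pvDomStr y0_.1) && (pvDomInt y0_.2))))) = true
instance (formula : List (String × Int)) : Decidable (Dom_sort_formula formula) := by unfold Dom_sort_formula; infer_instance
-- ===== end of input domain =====

-- B replaces A's staged extract-C / extract-H / sort-the-rest construction by a single sort of the
-- dict items under a Hill-notation key (objective: idiomatic); the return values agree on all inputs.

-- ===== PORT A =====
def sort_formula (formula : List (String × Int)) : List (String × Int) :=
  -- fdict = dict((x[0], x[1]) for x in formula)
  let fdict : PySem.Dict String Int :=
    formula.foldl (fun d x => d.insert x.1 x.2) PySem.Dict.empty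
  let sorted_formula : List (String × Int) := []
  -- if "C" in fdict: sorted_formula.append(["C", fdict["C"]]); del fdict["C"]
  -- (fdict["C"] is guarded by the containment test, so `getD _ 0` is exact here; same for "H")
  let st1 : List (String × Int) × PySem.Dict String Int :=
    if fdict.contains "C" then
      (sorted_formula ++ [("C", fdict.getD "C" 0)], fdict.erase "C")
    else (sorted_formula, fdict)
  -- if "H" in fdict: sorted_formula.append(["H", fdict["H"]]); del fdict["H"]
  let st2 : List (String × Int) × PySem.Dict String Int :=
    if st1.2.contains "H" then
      (st1.1 ++ [("H", st1.2.getD "H" 0)], st1.2.erase "H")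
    else st1
  -- if fdict: flist = [[key, fdict[key]] for key in fdict]; flist.sort(); append each [e[0], e[1]]
  -- (fdict[key] is a lookup of a key known to be present, so `getD _ 0` is exact;
  --  flist.sort() compares the [key, value] lists lexicographically = sorted2 on (fst, snd))
  if st2.2.size ≠ 0 then
    let flist := st2.2.keys.map (fun key => (key, st2.2.getD key 0))
    let flist := PySem.List.sorted2 flist (fun e => e.1) (fun e => e.2)
    st2.1 ++ flist.map (fun e => (e.1, e.2))
  else st2.1

-- ===== PORT B =====
-- hill_key(kv): (0, "") for "C", (1, "") for "H", else (2, key)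
def hillKey1 (kv : String × Int) : Int :=
  if kv.1 = "C" then 0 else if kv.1 = "H" then 1 else 2
def hillKey2 (kv : String × Int) : String :=
  if kv.1 = "C" then "" else if kv.1 = "H" then "" else kv.1

def sort_formula_alt (formula : List (String × Int)) : List (String × Int) :=
  -- fdict built pair by pair (keep-last on duplicate keys), then one sorted(..., key=hill_key)
  let fdict : PySem.Dict String Int :=
    formula.foldl (fun d x => d.insert x.1 x.2) PySem.Dict.empty
  (PySem.List.sorted2 fdict.items hillKey1 hillKey2).map (fun kv => (kv.1, kv.2))

-- ===== PRECONDITION & SPEC =====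
def Spec_sort_formula (formula : List (String × Int)) (out : List (String × Int)) : Prop := out = sort_formula_alt formula
instance (formula : List (String × Int)) (out : List (String × Int)) : Decidable (Spec_sort_formula formula out) := by unfold Spec_sort_formula; infer_instance

-- ===== CLAIM (what is proved, stated in full; the proofs are below) =====
def Claim_equal_sort_formula : Prop := ∀ (formula : List (String × Int)), Dom_sort_formula formula → Spec_sort_formula formula (sort_formula formula)

-- ===== LEMMAS AND PROOFS =====

theorem sorted2_eq_sorted_lex {α κ₁ κ₂ : Type} [LinearOrder κ₁] [LinearOrder κ₂]
    (xs : List α) (k1 : α → κ₁) (k2 : α → κ₂) :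
    PySem.List.sorted2 xs k1 k2 = PySem.List.sorted xs (fun x => toLex (k1 x, k2 x)) := by
  simp only [PySem.List.sorted2, PySem.List.sorted, if_neg (by decide : ¬ (false = true))]
  have hb : (fun (a b : α) => decide (k1 a < k1 b) || !decide (k1 b < k1 a) && decide (k2 a < k2 b))
      = fun a b => decide (toLex (k1 a, k2 a) < toLex (k1 b, k2 b)) := by
    funext a b
    rcases lt_trichotomy (k1 a) (k1 b) with h | h | h
    · simp [Prod.Lex.lt_iff, h, not_lt_of_gt h]
    · simp [Prod.Lex.lt_iff, h]
    · simp [Prod.Lex.lt_iff, h, not_lt_of_gt h, h.ne']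
  rw [hb]

theorem filter_key_of_not_contains (L : List (String × Int)) (c : String)
    (h : L.any (fun p => p.1 == c) = false) :
    L.filter (fun p => p.1 == c) = [] := by
  rw [List.filter_eq_nil_iff]
  intro p hp
  simpa using (List.any_eq_false.mp h p hp)

theorem filter_key_of_contains (L : List (String × Int))
    (hnd : (L.map (fun p => p.1)).Nodup) (c : String)
    (hc : L.any (fun p => p.1 == c) = true) :
    L.filter (fun p => p.1 == c)
      = [(c, (Option.map (fun x => x.2) (L.find? (fun p => p.1 == c))).getD 0)] := by
  induction L with
  | nil => simp at hc
  | cons a t ih =>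
    rw [List.map_cons, List.nodup_cons] at hnd
    by_cases ha : a.1 = c
    · have hrest : t.filter (fun p => p.1 == c) = [] := by
        rw [List.filter_eq_nil_iff]
        intro p hp hpc
        have hp1 : p.1 = c := by simpa using hpc
        exact hnd.1 (List.mem_map.mpr ⟨p, hp, by rw [hp1, ha]⟩)
      obtain ⟨a1, a2⟩ := a
      simp only at ha
      subst ha
      simp [hrest]
    · have hc' : t.any (fun p => p.1 == c) = true := by
        simpa [List.any_cons, ha] using hc
      have hfind : List.find? (fun p => p.1 == c) (a :: t) = List.find? (fun p => p.1 == c) t := by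
        rw [List.find?_cons_of_neg (by simpa using ha)]
      rw [hfind, List.filter_cons, if_neg (by simpa using ha)]
      exact ih hnd.2 hc'

-- with pairwise-distinct keys the entries with key c are at most one, so any Pairwise holds

theorem pairwise_filter_key (L : List (String × Int))
    (hnd : (L.map (fun p => p.1)).Nodup) (c : String) (R : (String × Int) → (String × Int) → Prop) :
    (L.filter (fun p => p.1 == c)).Pairwise R := by
  induction L with
  | nil => simp
  | cons a t ih =>
    rw [List.map_cons, List.nodup_cons] at hnd
    by_cases ha : a.1 = c
    · have hrest : t.filter (fun p => p.1 == c) = [] := by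
        rw [List.filter_eq_nil_iff]
        intro p hp hpc
        have hp1 : p.1 = c := by simpa using hpc
        exact hnd.1 (List.mem_map.mpr ⟨p, hp, by rw [hp1, ha]⟩)
      simp [ha, hrest]
    · rw [List.filter_cons, if_neg (by simpa using ha)]
      exact ih hnd.2

theorem hill_concat (L : List (String × Int)) (hnd : (L.map (fun p => p.1)).Nodup) :
    PySem.List.sorted2 L hillKey1 hillKey2
      = L.filter (fun p => p.1 == "C")
        ++ (L.filter (fun p => !(p.1 == "C"))).filter (fun p => p.1 == "H")
        ++ PySem.List.sorted2
            ((L.filter (fun p => !(p.1 == "C"))).filter (fun p => !(p.1 == "H")))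
            (fun e => e.1) (fun e => e.2) := by
  rw [sorted2_eq_sorted_lex, sorted2_eq_sorted_lex]
  set L1 := L.filter (fun p => !(p.1 == "C")) with hL1
  set L2 := L1.filter (fun p => !(p.1 == "H")) with hL2
  set cP := L.filter (fun p => p.1 == "C") with hcP
  set hP := L1.filter (fun p => p.1 == "H") with hhP
  set S := PySem.List.sorted L2 (fun e => toLex (e.1, e.2)) with hS
  -- membership facts
  have hndL1 : (L1.map (fun p => p.1)).Nodup :=
    List.Nodup.sublist (List.Sublist.map _ List.filter_sublist) hnd
  have hndL2 : (L2.map (fun p => p.1)).Nodup :=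
    List.Nodup.sublist (List.Sublist.map _ List.filter_sublist) hndL1
  have hSperm : S.Perm L2 := PySem.List.sorted_perm _ _ _
  have hmemS : ∀ b ∈ S, ¬ b.1 = "C" ∧ ¬ b.1 = "H" := by
    intro b hb
    have hb2 : b ∈ L2 := (PySem.List.mem_sorted _ _ _ _).mp hb
    have h1 := List.of_mem_filter hb2
    have h2 := List.of_mem_filter (List.mem_of_mem_filter hb2)
    exact ⟨by simpa using h2, by simpa using h1⟩
  apply PySem.List.sorted_eq_of_perm_of_pairwise_lt
  · -- permutation
    have h1 : (cP ++ hP ++ S).Perm (cP ++ (hP ++ L2)) := by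
      rw [List.append_assoc]
      exact List.Perm.append_left _ (List.Perm.append_left _ hSperm)
    have h2 : (hP ++ L2).Perm L1 := List.filter_append_perm _ _
    have h3 : (cP ++ L1).Perm L := List.filter_append_perm _ _
    exact h1.trans ((List.Perm.append_left _ h2).trans h3)
  · -- pairwise strictly increasing Hill key
    rw [List.append_assoc, List.pairwise_append, List.pairwise_append]
    refine ⟨pairwise_filter_key L hnd _ _, ⟨pairwise_filter_key L1 hndL1 _ _, ?_, ?_⟩, ?_⟩
    · -- within S
      have hle := PySem.List.sorted_pairwise L2 (fun e => toLex (e.1, e.2))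
      have hne : S.Pairwise (fun a b => ¬ a.1 = b.1) := by
        have : (S.map (fun p => p.1)).Nodup :=
          ((hSperm.map _).nodup_iff).mpr hndL2
        simpa [List.Nodup, List.pairwise_map] using this
      refine ((hle.and hne).imp_of_mem ?_)
      intro a b ha hb h
      obtain ⟨hle', hne'⟩ := h
      obtain ⟨haC, haH⟩ := hmemS a ha
      obtain ⟨hbC, hbH⟩ := hmemS b hb
      have h1 : a.1 < b.1 := by
        rcases Prod.Lex.le_iff.mp hle' with h | ⟨h, _⟩
        · exact h
        · exact absurd h hne'
      simp only [hillKey1, hillKey2, if_neg haC, if_neg haH, if_neg hbC, if_neg hbH]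
      exact Prod.Lex.lt_iff.mpr (Or.inr ⟨rfl, h1⟩)
    · -- hP before S
      intro a ha b hb
      have ha1 : a.1 = "H" := by simpa using List.of_mem_filter ha
      obtain ⟨hbC, hbH⟩ := hmemS b hb
      have hHC : ¬ ("H":String) = "C" := by decide
      have ka : toLex (hillKey1 a, hillKey2 a) = toLex ((1:Int), "") := by
        simp [hillKey1, hillKey2, ha1, hHC]
      have kb : toLex (hillKey1 b, hillKey2 b) = toLex ((2:Int), b.1) := by
        simp [hillKey1, hillKey2, hbC, hbH]
      rw [ka, kb]
      exact Prod.Lex.lt_iff.mpr (Or.inl (by norm_num))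
    · -- cP before hP ++ S
      intro a ha b hb
      have ha1 : a.1 = "C" := by simpa using List.of_mem_filter ha
      have ka : toLex (hillKey1 a, hillKey2 a) = toLex ((0:Int), "") := by
        simp [hillKey1, hillKey2, ha1]
      rw [ka]
      have hHC : ¬ ("H":String) = "C" := by decide
      rcases List.mem_append.mp hb with hb | hb
      · have hb1 : b.1 = "H" := by simpa using List.of_mem_filter hb
        have kb : toLex (hillKey1 b, hillKey2 b) = toLex ((1:Int), "") := by
          simp [hillKey1, hillKey2, hb1, hHC]
        rw [kb]
        exact Prod.Lex.lt_iff.mpr (Or.inl (by norm_num))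
      · obtain ⟨hbC, hbH⟩ := hmemS b hb
        have kb : toLex (hillKey1 b, hillKey2 b) = toLex ((2:Int), b.1) := by
          simp [hillKey1, hillKey2, hbC, hbH]
        rw [kb]
        exact Prod.Lex.lt_iff.mpr (Or.inl (by norm_num))

theorem stage2_eq (pre : List (String × Int)) (d' : PySem.Dict String Int)
    (hnd' : (d'.items.map (fun p => p.1)).Nodup) :
    (let st2 : List (String × Int) × PySem.Dict String Int :=
      if d'.contains "H" then (pre ++ [("H", d'.getD "H" 0)], d'.erase "H") else (pre, d');
     if st2.2.size ≠ 0 then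
       st2.1 ++ (PySem.List.sorted2 (st2.2.keys.map (fun key => (key, st2.2.getD key 0)))
          (fun e => e.1) (fun e => e.2)).map (fun e => (e.1, e.2))
     else st2.1)
    = pre ++ d'.items.filter (fun p => p.1 == "H")
        ++ PySem.List.sorted2 (d'.items.filter (fun p => !(p.1 == "H")))
            (fun e => e.1) (fun e => e.2) := by
  have hmapid : ∀ (l : List (String × Int)), l.map (fun e : String × Int => (e.1, e.2)) = l := by
    intro l; simp
  by_cases hH : d'.contains "H" = true
  · have hHany : d'.items.any (fun p => p.1 == "H") = true := by
      simpa [PySem.Dict.contains] using hH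
    have hhP : d'.items.filter (fun p => p.1 == "H") = [("H", d'.getD "H" 0)] := by
      rw [filter_key_of_contains _ hnd' _ hHany]; rfl
    have heitems : (d'.erase "H").items = d'.items.filter (fun p => !(p.1 == "H")) := rfl
    have hndE : ((d'.erase "H").items.map (fun p => p.1)).Nodup := by
      rw [heitems]
      exact List.Nodup.sublist (List.Sublist.map _ List.filter_sublist) hnd'
    have hkeys : (d'.erase "H").keys.map (fun key => (key, (d'.erase "H").getD key 0))
        = (d'.erase "H").items :=
      (PySem.Dict.items_eq_map_keys _ (by simpa [PySem.Dict.keys] using hndE) 0).symm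
    simp only [hH, if_true]
    by_cases hE : (d'.erase "H").size ≠ 0
    · rw [if_pos hE]
      simp only [hkeys, heitems, hmapid, hhP, List.append_assoc]
    · have : (d'.erase "H").items = [] := by
        have := of_not_not hE
        simpa [PySem.Dict.size, List.length_eq_zero_iff] using this
      rw [heitems] at this
      rw [if_neg hE, this, hhP]
      simp [PySem.List.sorted2]
  · have hHany : d'.items.any (fun p => p.1 == "H") = false :=
      Bool.eq_false_iff.mpr (fun h => hH h)
    have hhP : d'.items.filter (fun p => p.1 == "H") = [] :=
      filter_key_of_not_contains _ _ hHany
    have hfself : d'.items.filter (fun p => !(p.1 == "H")) = d'.items := by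
      rw [List.filter_eq_self]
      intro p hp
      simpa using List.any_eq_false.mp hHany p hp
    have hkeys : d'.keys.map (fun key => (key, d'.getD key 0)) = d'.items :=
      (PySem.Dict.items_eq_map_keys _ (by simpa [PySem.Dict.keys] using hnd') 0).symm
    simp only [hH, if_false, Bool.false_eq_true]
    by_cases hE : d'.size ≠ 0
    · rw [if_pos hE]
      simp only [hkeys, hmapid, hhP, hfself, List.nil_append, List.append_assoc]
    · have hnil : d'.items = [] := by
        have := of_not_not hE
        simpa [PySem.Dict.size, List.length_eq_zero_iff] using this
      rw [if_neg hE, hhP, hfself, hnil]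
      simp [PySem.List.sorted2]

-- ===== VERDICT (by name: the statement is the Claim_ definition above) =====
theorem sort_formula_spec : Claim_equal_sort_formula := by
  intro formula _dom
  unfold Spec_sort_formula
  unfold sort_formula sort_formula_alt
  set d := formula.foldl (fun d (x : String × Int) => d.insert x.1 x.2) PySem.Dict.empty with hd
  have hndk : d.keys.Nodup :=
    PySem.Dict.nodup_keys_foldl_insert_key formula (fun x : String × Int => x.1)
      (fun _ x => x.2) PySem.Dict.empty PySem.Dict.nodup_keys_empty
  have hnd : (d.items.map (fun p => p.1)).Nodup := by
    simpa [PySem.Dict.keys] using hndk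
  have hmapid : ∀ (l : List (String × Int)), l.map (fun e : String × Int => (e.1, e.2)) = l := by
    intro l; simp
  dsimp only
  by_cases hC : d.contains "C" = true
  · have hCany : d.items.any (fun p => p.1 == "C") = true := hC
    have hcP : d.items.filter (fun p => p.1 == "C") = [("C", d.getD "C" 0)] := by
      rw [filter_key_of_contains _ hnd _ hCany]; rfl
    have heitems : (d.erase "C").items = d.items.filter (fun p => !(p.1 == "C")) := rfl
    have hndE : ((d.erase "C").items.map (fun p => p.1)).Nodup := by
      rw [heitems]
      exact List.Nodup.sublist (List.Sublist.map _ List.filter_sublist) hnd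
    simp only [hC, if_true]
    apply Eq.trans (stage2_eq ([] ++ [("C", d.getD "C" 0)]) (d.erase "C") hndE)
    rw [hill_concat d.items hnd]
    simp only [hmapid, heitems, hcP, List.nil_append]
  · have hCany : d.items.any (fun p => p.1 == "C") = false :=
      Bool.eq_false_iff.mpr (fun h => hC h)
    have hcP : d.items.filter (fun p => p.1 == "C") = [] :=
      filter_key_of_not_contains _ _ hCany
    have hfself : d.items.filter (fun p => !(p.1 == "C")) = d.items := by
      rw [List.filter_eq_self]
      intro p hp
      simpa using List.any_eq_false.mp hCany p hp
    simp only [hC, if_false, Bool.false_eq_true]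
    apply Eq.trans (stage2_eq [] d hnd)
    rw [hill_concat d.items hnd]
    simp only [hmapid, hcP, hfself, List.nil_append]
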